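-- pv_equiv track=rewrite | github.com/andynines/pierogi | pstl/pstl.py | generate_class_definitions
-- ===== SOURCE A (Python) =====
-- from typing import Dict, List
--
-- def get_field_names(node_type: str, source_dict: Dict[str, Dict[str, str]]) -> List[str]:
--     return list(source_dict[node_type].keys())
--
-- def generate_constructor_arguments(node_type: str, source_dict: Dict[str, Dict[str, str]]) -> str:
--     field_names = get_field_names(node_type, source_dict)
--     arguments = ["expression {0}".format(field_name) for field_name in field_names]
--     return ", ".join(arguments)
--
-- def generate_field_initializers(node_type: str, source_dict: Dict[str, Dict[str, str]]) -> str: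
--     field_names = get_field_names(node_type, source_dict)
--     initializers = ["{0}({0})".format(field_name) for field_name in field_names]
--     return ", ".join(initializers)
--
-- def generate_fields(node_type: str, source_dict: Dict[str, Dict[str, str]]) -> str:
--     field_type_dict = source_dict[node_type]
--     fields = ["{1} {0};".format(field_name, field_type) for field_name, field_type in field_type_dict.items()]
--     return "\n    ".join(fields)
--
-- def generate_class_definitions(node_types: List[str], source_dict: Dict[str, Dict[str, str]]) -> str:
--     class_definition_template = """struct {node_type} final {{
--     explicit {node_type}({constructor_arguments}) : {field_initializers} {{}}
--     {fields}
-- }};"""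
--     definitions = [class_definition_template.format(
--         node_type=node_type,
--         constructor_arguments=generate_constructor_arguments(node_type, source_dict),
--         field_initializers=generate_field_initializers(node_type, source_dict),
--         fields=generate_fields(node_type, source_dict)
--     ) for node_type in node_types]
--     return "\n\n".join(definitions)
-- ===== SOURCE B (Python) =====
-- def generate_class_definitions(node_types, source_dict):
--     # Data-driven template interpreter: the struct layout is a token tuple
--     # (literal strings, the node-type slot 0, and three field-section slots);
--     # one pass walks node types and tokens, emitting every piece into a single
--     # flat token stream with explicit separator tokens, joined once at the end.
--     template = ("struct ", 0, " final {\n    explicit ", 0, "(", 1, ") : ", 2,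
--                 " {}\n    ", 3, "\n};")
--     sections = {
--         1: (", ", lambda name, typ: "expression " + name),
--         2: (", ", lambda name, typ: name + "(" + name + ")"),
--         3: ("\n    ", lambda name, typ: typ + " " + name + ";"),
--     }
--     out = []
--     first_struct = True
--     for node_type in node_types:
--         if not first_struct:
--             out.append("\n\n")
--         first_struct = False
--         for tok in template:
--             if isinstance(tok, str):
--                 out.append(tok)
--             elif tok == 0:
--                 out.append(node_type)
--             else:
--                 sep, fmt = sections[tok]
--                 first = True
--                 for name, typ in source_dict[node_type].items():
--                     if not first:
--                         out.append(sep)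
--                     first = False
--                     out.append(fmt(name, typ))
--     return "".join(out)
-- ===== Notes on version B (the rewrite author's own statement) =====
-- stated objective: alternative
-- what changed: Replaces A's per-section helper functions and string template formatting with a data-driven template interpreter: the struct layout is a token table (literals, a node-type slot, three section slots with their separators/formatters) and one interpreter loop emits every piece into a single flat token stream with explicit separator tokens, concatenated by one final ''.join -- no intermediate per-section strings or per-struct strings are ever built.
import Mathlib
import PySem

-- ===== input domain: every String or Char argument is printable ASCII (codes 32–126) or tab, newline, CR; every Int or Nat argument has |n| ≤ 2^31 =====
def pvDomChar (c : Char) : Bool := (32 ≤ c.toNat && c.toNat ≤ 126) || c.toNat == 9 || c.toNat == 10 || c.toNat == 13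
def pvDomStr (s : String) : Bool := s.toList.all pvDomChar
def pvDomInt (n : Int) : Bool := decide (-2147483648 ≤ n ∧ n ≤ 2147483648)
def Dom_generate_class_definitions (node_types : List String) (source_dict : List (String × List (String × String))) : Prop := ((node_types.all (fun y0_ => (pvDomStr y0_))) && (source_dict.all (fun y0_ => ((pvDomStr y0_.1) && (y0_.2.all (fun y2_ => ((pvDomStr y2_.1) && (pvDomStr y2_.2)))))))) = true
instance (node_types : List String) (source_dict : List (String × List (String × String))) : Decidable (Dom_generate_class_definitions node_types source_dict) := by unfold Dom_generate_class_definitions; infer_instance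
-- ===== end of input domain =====

-- B replaces A's per-section helper functions and template.format by a data-driven template
-- interpreter emitting one flat token stream, joined once; objective: alternative decomposition.

-- Shared input conversion: the Python function receives source_dict as a dict of dicts;
-- this builds that dict-of-dicts (Python dict semantics: overwrite keeps position) from the
-- association-list input. Used by both ports as part of reading the input.
def pvDictOf (source_dict : List (String × List (String × String))) :
    PySem.Dict String (PySem.Dict String String) :=
  PySem.Dict.ofList (source_dict.map (fun p => (p.1, PySem.Dict.ofList p.2)))

-- ===== PORT A =====
-- source_dict[node_type] raises KeyError when the key is missing; that input is excluded by
-- Pre_ below, so the default Dict.empty is never reached on admitted inputs.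
def pv_get_field_names (node_type : String) (source_dict : List (String × List (String × String))) : List String :=
  ((pvDictOf source_dict).getD node_type PySem.Dict.empty).keys

def pv_generate_constructor_arguments (node_type : String) (source_dict : List (String × List (String × String))) : String :=
  PySem.Str.join ", " ((pv_get_field_names node_type source_dict).map (fun field_name => "expression " ++ field_name))

def pv_generate_field_initializers (node_type : String) (source_dict : List (String × List (String × String))) : String :=
  PySem.Str.join ", " ((pv_get_field_names node_type source_dict).map (fun field_name => field_name ++ "(" ++ field_name ++ ")"))

def pv_generate_fields (node_type : String) (source_dict : List (String × List (String × String))) : String :=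
  PySem.Str.join "\n    " (((pvDictOf source_dict).getD node_type PySem.Dict.empty).items.map
    (fun p => p.2 ++ " " ++ p.1 ++ ";"))

def pv_template (node_type constructor_arguments field_initializers fields : String) : String :=
  "struct " ++ node_type ++ " final {\n    explicit " ++ node_type ++ "(" ++ constructor_arguments
    ++ ") : " ++ field_initializers ++ " {}\n    " ++ fields ++ "\n};"

def generate_class_definitions (node_types : List String) (source_dict : List (String × List (String × String))) : String :=
  PySem.Str.join "\n\n" (node_types.map (fun node_type =>
    pv_template node_type
      (pv_generate_constructor_arguments node_type source_dict)
      (pv_generate_field_initializers node_type source_dict)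
      (pv_generate_fields node_type source_dict)))

-- ===== PORT B =====
-- B's template token table: literal pieces, the node-type slot, and the three field sections.
inductive PvTok where
  | lit : String → PvTok
  | name : PvTok
  | args : PvTok
  | inits : PvTok
  | flds : PvTok
deriving DecidableEq, Repr

def pvTemplate : List PvTok :=
  [.lit "struct ", .name, .lit " final {\n    explicit ", .name, .lit "(", .args,
   .lit ") : ", .inits, .lit " {}\n    ", .flds, .lit "\n};"]

-- the inner 'for name, typ in items: if not first: out.append(sep); out.append(fmt(...))' loop
def pvEmitSection (sep : String) (fmt : String × String → String)
    (items : List (String × String)) (out : List String) : List String :=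
  (items.foldl (fun (st : List String × Bool) p =>
      ((if st.2 then st.1 else st.1 ++ [sep]) ++ [fmt p], false)) (out, true)).1

-- one token of the template: literal / node-type slot / a section (sections table inlined)
def pvEmitTok (node_type : String) (items : List (String × String))
    (out : List String) (tok : PvTok) : List String :=
  match tok with
  | .lit s => out ++ [s]
  | .name => out ++ [node_type]
  | .args => pvEmitSection ", " (fun p => "expression " ++ p.1) items out
  | .inits => pvEmitSection ", " (fun p => p.1 ++ "(" ++ p.1 ++ ")") items out
  | .flds => pvEmitSection "\n    " (fun p => p.2 ++ " " ++ p.1 ++ ";") items out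

def generate_class_definitions_alt (node_types : List String) (source_dict : List (String × List (String × String))) : String :=
  PySem.Str.join "" ((node_types.foldl (fun (st : List String × Bool) node_type =>
      (pvTemplate.foldl
        (pvEmitTok node_type ((pvDictOf source_dict).getD node_type PySem.Dict.empty).items)
        (if st.2 then st.1 else st.1 ++ ["\n\n"]), false))
    ([], true)).1)

-- ===== PRECONDITION & SPEC =====
-- Pre_ excludes exactly the inputs where A raises KeyError: a node type absent from source_dict.
def Pre_generate_class_definitions (node_types : List String) (source_dict : List (String × List (String × String))) : Prop :=
  ∀ t ∈ node_types, t ∈ source_dict.map Prod.fst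
instance (node_types : List String) (source_dict : List (String × List (String × String))) : Decidable (Pre_generate_class_definitions node_types source_dict) := by unfold Pre_generate_class_definitions; infer_instance

def pvWitness_generate_class_definitions : List String × (List (String × List (String × String))) :=
  (["Add", "Neg"], [("Add", [("lhs", "int"), ("rhs", "int")]), ("Neg", [("operand", "int")])])

def Spec_generate_class_definitions (node_types : List String) (source_dict : List (String × List (String × String))) (out : String) : Prop := out = generate_class_definitions_alt node_types source_dict
instance (node_types : List String) (source_dict : List (String × List (String × String))) (out : String) : Decidable (Spec_generate_class_definitions node_types source_dict out) := by unfold Spec_generate_class_definitions; infer_instance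

-- ===== CLAIM (what is proved, stated in full; the proofs are below) =====
def Claim_equal_generate_class_definitions : Prop := ∀ (node_types : List String) (source_dict : List (String × List (String × String))), Dom_generate_class_definitions node_types source_dict → Pre_generate_class_definitions node_types source_dict → Spec_generate_class_definitions node_types source_dict (generate_class_definitions node_types source_dict)

-- ===== LEMMAS AND PROOFS =====

-- String-level facts about PySem.Str.join, lifted from the PySem.Chars.join lemmas.
theorem pv_joinE_cons (x : String) (xs : List String) :
    PySem.Str.join "" (x :: xs) = x ++ PySem.Str.join "" xs := by
  cases xs with
  | nil => simp [PySem.Str.join, PySem.Chars.join_singleton, PySem.Chars.join_nil]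
  | cons y ys => simp [PySem.Str.join, PySem.Chars.join_cons_cons]

theorem pv_join_nil (sep : String) : PySem.Str.join sep [] = "" := by
  simp [PySem.Str.join, PySem.Chars.join_nil]

theorem pv_join_singleton (sep x : String) : PySem.Str.join sep [x] = x := by
  simp [PySem.Str.join, PySem.Chars.join_singleton]

theorem pv_join_cons_cons (sep x y : String) (ys : List String) :
    PySem.Str.join sep (x :: y :: ys) = x ++ sep ++ PySem.Str.join sep (y :: ys) := by
  simp [PySem.Str.join, PySem.Chars.join_cons_cons]
  rw [String.append_assoc]

theorem pv_joinE_append (a b : List String) :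
    PySem.Str.join "" (a ++ b) = PySem.Str.join "" a ++ PySem.Str.join "" b := by
  induction a with
  | nil => simp [pv_join_nil]
  | cons x xs ih => simp [pv_joinE_cons, ih, String.append_assoc]

-- The interleaved chunk a 'first'-flag separator loop emits for a list of items.
def pvChunks {α : Type} (sep : String) (g : α → List String) : List α → List String
  | [] => []
  | x :: xs => g x ++ xs.flatMap (fun y => sep :: g y)

-- The 'first'-flag loop that emits sep before every item but the first, generically:
-- f must be an emitter (appends g x to its accumulator).
theorem pv_flagfold_false {α : Type} (f : List String → α → List String) (g : α → List String)
    (sep : String) (h : ∀ out x, f out x = out ++ g x) (l : List α) (out : List String) :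
    (l.foldl (fun (st : List String × Bool) x =>
        (f (if st.2 then st.1 else st.1 ++ [sep]) x, false)) (out, false)).1
      = out ++ l.flatMap (fun x => sep :: g x) := by
  induction l generalizing out with
  | nil => simp
  | cons x xs ih =>
      rw [List.foldl_cons]
      show (List.foldl _ (f (out ++ [sep]) x, false) xs).1 = _
      rw [ih, h]
      simp [List.append_assoc]

theorem pv_flagfold_true {α : Type} (f : List String → α → List String) (g : α → List String)
    (sep : String) (h : ∀ out x, f out x = out ++ g x) (l : List α) (out : List String) :
    (l.foldl (fun (st : List String × Bool) x =>
        (f (if st.2 then st.1 else st.1 ++ [sep]) x, false)) (out, true)).1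
      = out ++ pvChunks sep g l := by
  cases l with
  | nil => simp [pvChunks]
  | cons x xs =>
      rw [List.foldl_cons]
      show (List.foldl _ (f out x, false) xs).1 = _
      rw [pv_flagfold_false f g sep h, h, pvChunks, List.append_assoc]

-- Joining an interleaved token stream with "" equals joining the per-item strings with sep.
theorem pv_join_blocks {α : Type} (sep : String) (g : α → List String) (l : List α) :
    PySem.Str.join "" (pvChunks sep g l)
      = PySem.Str.join sep (l.map (fun x => PySem.Str.join "" (g x))) := by
  induction l with
  | nil => simp [pvChunks, pv_join_nil]
  | cons x xs ih =>
      cases xs with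
      | nil => simp [pvChunks, pv_join_singleton]
      | cons y ys =>
          simp only [List.map_cons]
          rw [pv_join_cons_cons]
          have ih' : PySem.Str.join sep (PySem.Str.join "" (g y) ::
              List.map (fun x => PySem.Str.join "" (g x)) ys)
              = PySem.Str.join "" (pvChunks sep g (y :: ys)) := ih.symm
          rw [ih']
          show PySem.Str.join "" (g x ++ ([sep] ++ (g y ++ ys.flatMap (fun z => sep :: g z)))) = _
          rw [pv_joinE_append, pv_joinE_append, pv_joinE_cons, pv_join_nil]
          show _ = PySem.Str.join "" (g x) ++ sep ++ PySem.Str.join "" (pvChunks sep g (y :: ys))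
          rw [pvChunks]
          simp [String.append_assoc]

-- B's inner section loop: its emitted chunk, via the generic flag-fold lemma.
def pvSecChunks (sep : String) (fmt : String × String → String)
    (l : List (String × String)) : List String :=
  pvChunks sep (fun p => [fmt p]) l

theorem pv_emitSection_eq (sep : String) (fmt : String × String → String)
    (l : List (String × String)) (out : List String) :
    pvEmitSection sep fmt l out = out ++ pvSecChunks sep fmt l := by
  unfold pvEmitSection pvSecChunks
  exact pv_flagfold_true (fun out p => out ++ [fmt p]) (fun p => [fmt p]) sep
    (fun _ _ => rfl) l out

-- Joining a section chunk with "" is the sep-join of the formatted items.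
theorem pv_joinE_secChunks (sep : String) (fmt : String × String → String)
    (l : List (String × String)) :
    PySem.Str.join "" (pvSecChunks sep fmt l) = PySem.Str.join sep (l.map fmt) := by
  unfold pvSecChunks
  rw [pv_join_blocks sep (fun p => [fmt p]) l]
  simp only [pv_join_singleton]

-- The chunk B's template interpreter emits for one node type.
def pvBlock (node_type : String) (items : List (String × String)) : List String :=
  ["struct ", node_type, " final {\n    explicit ", node_type, "("]
    ++ pvSecChunks ", " (fun p => "expression " ++ p.1) items
    ++ [") : "] ++ pvSecChunks ", " (fun p => p.1 ++ "(" ++ p.1 ++ ")") items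
    ++ [" {}\n    "] ++ pvSecChunks "\n    " (fun p => p.2 ++ " " ++ p.1 ++ ";") items
    ++ ["\n};"]

theorem pv_templateFold_eq (node_type : String) (items : List (String × String))
    (out : List String) :
    pvTemplate.foldl (pvEmitTok node_type items) out = out ++ pvBlock node_type items := by
  simp [pvTemplate, List.foldl, pvEmitTok, pv_emitSection_eq, pvBlock, List.append_assoc]

-- Joining one block with "" gives exactly A's formatted struct definition.
theorem pv_joinE_block (node_type : String) (source_dict : List (String × List (String × String))) :
    PySem.Str.join "" (pvBlock node_type ((pvDictOf source_dict).getD node_type PySem.Dict.empty).items)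
      = pv_template node_type
          (pv_generate_constructor_arguments node_type source_dict)
          (pv_generate_field_initializers node_type source_dict)
          (pv_generate_fields node_type source_dict) := by
  unfold pvBlock pv_template pv_generate_constructor_arguments pv_generate_field_initializers
    pv_generate_fields pv_get_field_names
  simp only [PySem.Dict.keys, List.map_map]
  rw [pv_joinE_append, pv_joinE_append, pv_joinE_append, pv_joinE_append, pv_joinE_append,
    pv_joinE_append]
  rw [pv_joinE_secChunks, pv_joinE_secChunks, pv_joinE_secChunks]
  simp [pv_joinE_cons, pv_join_singleton, String.append_assoc, Function.comp_def]

theorem generate_class_definitions_eq_alt (node_types : List String)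
    (source_dict : List (String × List (String × String))) :
    generate_class_definitions node_types source_dict
      = generate_class_definitions_alt node_types source_dict := by
  unfold generate_class_definitions generate_class_definitions_alt
  rw [pv_flagfold_true
      (fun out node_type => pvTemplate.foldl
        (pvEmitTok node_type ((pvDictOf source_dict).getD node_type PySem.Dict.empty).items) out)
      (fun node_type => pvBlock node_type ((pvDictOf source_dict).getD node_type PySem.Dict.empty).items)
      "\n\n" (fun out t => pv_templateFold_eq t _ out) node_types []]
  rw [List.nil_append, pv_join_blocks]
  congr 1
  apply List.map_congr_left
  intro t _
  exact (pv_joinE_block t source_dict).symm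

-- ===== VERDICT (by name: the statement is the Claim_ definition above) =====
theorem generate_class_definitions_spec : Claim_equal_generate_class_definitions := by
  intro node_types source_dict _ _
  unfold Spec_generate_class_definitions
  exact generate_class_definitions_eq_alt node_types source_dict
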